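-- pv_equiv track=rewrite | github.com/jimmyryu04/pld_data_analysis | pld-tool/src/analyze_bp.py | count_bp_cc
-- ===== SOURCE A (Python) =====
-- from typing import List, Tuple
--
-- def get_pairs(struct: str) -> List[Tuple[int, int]]:
--     """Return list of base-paired indices from dot-bracket structure."""
--     stack = []
--     pairs = []
--
--     for i, c in enumerate(struct):
--         if c == '(': stack.append(i)
--         elif c == ')':
--             if stack: pairs.append((stack.pop(), i))
--     return pairs
--
-- def count_bp_cc(
--         structure: str, len_5utr: int, len_cds: int) -> int:
--     """Count base pairs within CDS region."""
--     pairs = get_pairs(structure)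
--     cds_start = len_5utr
--     cds_end = len_5utr + len_cds - 1
--     return sum(
--         1 for i, j in pairs if cds_start <= i <= cds_end and cds_start <= j <= cds_end
--     )
-- ===== SOURCE B (Python) =====
-- def count_bp_cc(structure: str, len_5utr: int, len_cds: int) -> int:
--     """Count base pairs within CDS region.
--
--     Counter-based: no index stack and no pairs list. Since every open paren
--     at index >= len_5utr is pushed after (hence popped before) any open at
--     index < len_5utr, it suffices to keep two counters of unmatched opens
--     (before / inside the window) and count a pair exactly when a ')' at
--     i <= cds_end consumes an 'inside' open (i < j bounds are then implied).
--     """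
--     cds_end = len_5utr + len_cds - 1
--     before = 0
--     inside = 0
--     count = 0
--     for i, c in enumerate(structure):
--         if c == '(':
--             if i >= len_5utr:
--                 inside += 1
--             else:
--                 before += 1
--         elif c == ')':
--             if inside > 0:
--                 inside -= 1
--                 if i <= cds_end:
--                     count += 1
--             elif before > 0:
--                 before -= 1
--     return count
-- ===== Notes on version B (the rewrite author's own statement) =====
-- stated objective: alternative
-- what changed: B replaces the index stack and intermediate pairs list with three integer counters (unmatched opens before/inside the window and the pair count) in one O(1)-space pass, correct because in-window opens always sit above pre-window opens on the stack.
import Mathlib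
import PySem

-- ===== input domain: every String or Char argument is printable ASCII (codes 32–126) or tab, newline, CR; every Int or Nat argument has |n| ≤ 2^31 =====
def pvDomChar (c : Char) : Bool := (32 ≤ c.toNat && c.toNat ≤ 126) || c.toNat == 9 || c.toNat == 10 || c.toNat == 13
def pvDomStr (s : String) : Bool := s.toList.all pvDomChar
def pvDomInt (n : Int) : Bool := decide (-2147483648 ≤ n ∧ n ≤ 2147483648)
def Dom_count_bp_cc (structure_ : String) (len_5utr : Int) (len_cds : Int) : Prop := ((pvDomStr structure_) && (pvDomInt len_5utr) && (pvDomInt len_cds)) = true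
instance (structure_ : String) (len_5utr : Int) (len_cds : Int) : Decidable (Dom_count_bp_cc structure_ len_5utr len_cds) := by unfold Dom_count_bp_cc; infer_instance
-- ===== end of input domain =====

-- B replaces A's index stack and intermediate pairs list with three integer counters
-- (unmatched opens before / inside the window, and the count) in one O(1)-space pass.

-- ===== PORT A =====
-- the loop body of get_pairs: state (stack, pairs)
def pvStepA (st : List Int × List (Int × Int)) (p : Int × Char) : List Int × List (Int × Int) :=
  if p.2 = '(' then (p.1 :: st.1, st.2)
  else if p.2 = ')' then
    match st.1 with
    | [] => st
    | x :: rest => (rest, st.2 ++ [(x, p.1)])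
  else st

def get_pairs (struct : String) : List (Int × Int) :=
  ((PySem.List.enumerate struct.toList).foldl pvStepA ([], [])).2

def count_bp_cc (structure_ : String) (len_5utr : Int) (len_cds : Int) : Int :=
  let pairs := get_pairs structure_
  let cds_start := len_5utr
  let cds_end := len_5utr + len_cds - 1
  pairs.foldl (fun acc p =>
    acc + (if cds_start ≤ p.1 ∧ p.1 ≤ cds_end ∧ cds_start ≤ p.2 ∧ p.2 ≤ cds_end then 1 else 0)) 0

-- ===== PORT B =====
-- the loop body of B: state (before, inside, count); u = len_5utr, e = cds_end
def pvStepB (u e : Int) (st : Int × Int × Int) (p : Int × Char) : Int × Int × Int :=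
  if p.2 = '(' then
    if u ≤ p.1 then (st.1, st.2.1 + 1, st.2.2) else (st.1 + 1, st.2.1, st.2.2)
  else if p.2 = ')' then
    if 0 < st.2.1 then (st.1, st.2.1 - 1, st.2.2 + (if p.1 ≤ e then 1 else 0))
    else if 0 < st.1 then (st.1 - 1, st.2.1, st.2.2)
    else st
  else st

def count_bp_cc_alt (structure_ : String) (len_5utr : Int) (len_cds : Int) : Int :=
  let cds_end := len_5utr + len_cds - 1
  ((PySem.List.enumerate structure_.toList).foldl (pvStepB len_5utr cds_end) (0, 0, 0)).2.2

-- ===== PRECONDITION & SPEC =====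
def Spec_count_bp_cc (structure_ : String) (len_5utr : Int) (len_cds : Int) (out : Int) : Prop := out = count_bp_cc_alt structure_ len_5utr len_cds
instance (structure_ : String) (len_5utr : Int) (len_cds : Int) (out : Int) : Decidable (Spec_count_bp_cc structure_ len_5utr len_cds out) := by unfold Spec_count_bp_cc; infer_instance

-- ===== CLAIM (what is proved, stated in full; the proofs are below) =====
def Claim_equal_count_bp_cc : Prop := ∀ (structure_ : String) (len_5utr : Int) (len_cds : Int), Dom_count_bp_cc structure_ len_5utr len_cds → Spec_count_bp_cc structure_ len_5utr len_cds (count_bp_cc structure_ len_5utr len_cds)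

-- ===== LEMMAS AND PROOFS =====

-- the summand of A's filtered count
def pvF (u e : Int) (p : Int × Int) : Int :=
  if u ≤ p.1 ∧ p.1 ≤ e ∧ u ≤ p.2 ∧ p.2 ≤ e then 1 else 0

lemma pv_sum_shift (u e : Int) (l : List (Int × Int)) (c : Int) :
    l.foldl (fun acc p => acc + pvF u e p) c = c + l.foldl (fun acc p => acc + pvF u e p) 0 := by
  induction l generalizing c with
  | nil => simp
  | cons p l ih =>
      simp only [List.foldl]
      rw [ih (c + pvF u e p), ih (0 + pvF u e p)]
      ring

-- A's pairs accumulator appends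
lemma pvA_acc (l : List (Int × Char)) (stack : List Int) (acc : List (Int × Int)) :
    (l.foldl pvStepA (stack, acc)).2 = acc ++ (l.foldl pvStepA (stack, [])).2 := by
  induction l generalizing stack acc with
  | nil => simp
  | cons p l ih =>
      simp only [List.foldl, pvStepA]
      split_ifs with h1 h2
      · exact ih _ _
      · cases stack with
        | nil => exact ih _ _
        | cons x rest =>
            simp only
            rw [ih rest (acc ++ [(x, p.1)]), ih rest ([] ++ [(x, p.1)])]
            simp
      · exact ih _ _

-- main invariant: when A's stack splits as stIn ++ stOut (in-window opens on top of
-- pre-window opens), B's counters are their lengths and its count collects c plus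
-- A's filtered sum over the pairs A would still emit.
lemma pv_main (u e : Int) (l : List (Int × Char)) (stIn stOut : List Int) (c : Int)
    (hIn : ∀ x ∈ stIn, u ≤ x) (hOut : ∀ x ∈ stOut, x < u)
    (hst : ∀ x ∈ stIn ++ stOut, ∀ p ∈ l, x < p.1)
    (hl : l.Pairwise (fun p q => p.1 < q.1)) :
    (l.foldl (pvStepB u e) (((stOut.length : Int), (stIn.length : Int), c))).2.2 =
      c + ((l.foldl pvStepA (stIn ++ stOut, [])).2).foldl (fun acc p => acc + pvF u e p) 0 := by
  induction l generalizing stIn stOut c with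
  | nil => simp
  | cons p l ih =>
      have hlrest : l.Pairwise (fun p q => p.1 < q.1) := hl.tail
      have hphead : ∀ q ∈ l, p.1 < q.1 := by
        intro q hq; exact (List.pairwise_cons.mp hl).1 q hq
      have hst' : ∀ x ∈ stIn ++ stOut, ∀ q ∈ l, x < q.1 := by
        intro x hx q hq; exact hst x hx q (List.mem_cons_of_mem _ hq)
      simp only [List.foldl, pvStepA, pvStepB]
      by_cases h1 : p.2 = '('
      · simp only [if_pos h1]
        by_cases h2 : u ≤ p.1
        · -- '(' with u ≤ p.1 : push to inside
          rw [if_pos h2]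
          have := ih (p.1 :: stIn) stOut c
            (by intro x hx; rcases List.mem_cons.mp hx with h | h
                · subst h; exact h2
                · exact hIn x h)
            hOut
            (by intro x hx q hq
                have hx' : x = p.1 ∨ x ∈ stIn ∨ x ∈ stOut := by simpa using hx
                rcases hx' with h | h | h
                · subst h; exact hphead q hq
                · exact hst' x (List.mem_append.mpr (Or.inl h)) q hq
                · exact hst' x (List.mem_append.mpr (Or.inr h)) q hq)
            hlrest
          simpa [List.length_cons, add_comm] using this
        · -- '(' with p.1 < u : stIn must be empty, push to before
          rw [if_neg h2]
          have hInNil : stIn = [] := by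
            cases stIn with
            | nil => rfl
            | cons x rest =>
                exfalso
                have hx1 : u ≤ x := hIn x (List.mem_cons_self ..)
                have hx2 : x < p.1 := hst x (by simp) p (List.mem_cons_self ..)
                omega
          subst hInNil
          have := ih [] (p.1 :: stOut) c
            (by simp)
            (by intro x hx; rcases List.mem_cons.mp hx with h | h
                · subst h; omega
                · exact hOut x h)
            (by intro x hx q hq
                have hx' : x = p.1 ∨ x ∈ stOut := by simpa using hx
                rcases hx' with h | h
                · subst h; exact hphead q hq
                · exact hst' x (by simpa using h) q hq)
            hlrest
          simpa [List.length_cons, add_comm] using this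
      by_cases h3 : p.2 = ')'
      · simp only [if_neg h1, if_pos h3]
        cases stIn with
        | cons j rest =>
            -- pop from inside
            simp only [List.cons_append]
            have hcnt : (0 : Int) < (((j :: rest).length : Nat) : Int) := by
              simp
            rw [if_pos hcnt]
            have hj : u ≤ j := hIn j (List.mem_cons_self ..)
            have hji : j < p.1 := hst j (by simp) p (List.mem_cons_self ..)
            have hcond : (if p.1 ≤ e then (1 : Int) else 0) = pvF u e (j, p.1) := by
              unfold pvF
              split_ifs with hA hB hB
              · rfl
              · exact absurd ⟨hj, by omega, by omega, hA⟩ hB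
              · exact absurd hB.2.2.2 hA
              · rfl
            have harith : (((j :: rest).length : Nat) : Int) - 1 = ((rest.length : Nat) : Int) := by
              simp
            rw [harith]
            have := ih rest stOut (c + (if p.1 ≤ e then (1:Int) else 0))
              (fun x hx => hIn x (List.mem_cons_of_mem _ hx))
              hOut
              (fun x hx q hq => hst' x (List.mem_cons_of_mem _ (by simpa using hx)) q hq)
              hlrest
            rw [pvA_acc l (rest ++ stOut) ([] ++ [(j, p.1)]), this]
            simp only [List.nil_append, List.cons_append, List.foldl]
            rw [pv_sum_shift u e ((l.foldl pvStepA (rest ++ stOut, [])).2) (0 + pvF u e (j, p.1))]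
            rw [hcond]
            ring
        | nil =>
            have h0 : ¬ (0:Int) < ((([] : List Int).length : Nat) : Int) := by simp
            rw [if_neg h0]
            simp only [List.nil_append]
            cases stOut with
            | cons k rest =>
                -- pop from before; pair filtered out since k < u
                have hcnt : (0 : Int) < (((k :: rest).length : Nat) : Int) := by simp
                rw [if_pos hcnt]
                show (List.foldl (pvStepB u e) _ l).2.2 = c + List.foldl (fun acc p => acc + pvF u e p) 0 (List.foldl pvStepA (rest, [] ++ [(k, p.1)]) l).2
                have hk : k < u := hOut k (List.mem_cons_self ..)
                have hF0 : pvF u e (k, p.1) = 0 := by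
                  unfold pvF
                  rw [if_neg]; omega
                have := ih [] rest c (by simp)
                  (fun x hx => hOut x (List.mem_cons_of_mem _ hx))
                  (fun x hx q hq => hst' x (by simpa using (List.mem_cons_of_mem k (by simpa using hx))) q hq)
                  hlrest
                simp only [List.nil_append] at this
                have harith : (((k :: rest).length : Nat) : Int) - 1 = ((rest.length : Nat) : Int) := by simp
                rw [harith]
                rw [pvA_acc l rest ([] ++ [(k, p.1)]), this]
                simp only [List.nil_append, List.cons_append, List.foldl]
                rw [pv_sum_shift u e ((l.foldl pvStepA (rest, [])).2) (0 + pvF u e (k, p.1))]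
                rw [hF0]
                ring
            | nil =>
                have h0' : ¬ (0:Int) < ((([] : List Int).length : Nat) : Int) := by simp
                rw [if_neg h0']
                exact ih [] [] c (by simp) (by simp) (by simp) hlrest
      · -- other char
        simp only [if_neg h1, if_neg h3]
        exact ih stIn stOut c hIn hOut hst' hlrest

-- ===== VERDICT (by name: the statement is the Claim_ definition above) =====
theorem count_bp_cc_spec : Claim_equal_count_bp_cc := by
  intro s u lc _
  unfold Spec_count_bp_cc count_bp_cc count_bp_cc_alt get_pairs
  simp only
  have := pv_main u (u + lc - 1) (PySem.List.enumerate s.toList) [] [] 0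
    (by simp) (by simp) (by simp) (PySem.List.pairwise_lt_enumerate ..)
  simp only [List.length_nil, Int.natCast_zero, List.nil_append] at this
  rw [this]
  simp only [pvF, zero_add]
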